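-- pv_equiv track=rewrite | github.com/bluerobotics/br-components-database | Kicad-Odoo Initial Library Commit/1_Kicad_BREinitialization.py | generate_BRE
-- ===== SOURCE A (Python) =====
-- def generate_BRE(existing_BREs):
--     """
--     Generate a unique BRE number by counting up from 000000 and making sure the generated value is not already an existing BRE
--
--     Parameters
--     ----------
--     existing BREs (list of str): A list containing all existing BRE numbers to ensure that there are no parts incorrectly assigned to the same BRE
--
--     Returns
--     -------
--     BRE (str) : A unique string of the form BRE-xxxxxx, with the number of digits determined by the parameter num_digits in the function
--     """
--     # Set number of digits in unique BRE
--     num_digits = 6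
--
--     # Increment by 1 until the BRE doesn't exist
--     for n in range(10**num_digits):
--
--         # Convert to a zero padded string (to fill the desired number of digits -- e.g, 1 --> '0001')
--         BR_num = str(n).zfill(num_digits)
--         BRE = 'BRE-' + BR_num
--
--         # If the new BRE isn't currently used, we've found the one!
--         if BRE not in existing_BREs:
--             break
--
--     return BRE
-- ===== SOURCE B (Python) =====
-- def generate_BRE(existing_BREs):
--     # The only strings that can ever collide with a generated number are the
--     # well-formed ones: 'BRE-' followed by exactly six digits.  Sort them and
--     # find the first position n whose canonical key is not at position n.
--     keys = sorted({s for s in existing_BREs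
--                    if len(s) == 10 and s.startswith('BRE-') and s[4:].isdigit()})
--     for n in range(10**6):
--         if n >= len(keys) or keys[n] != 'BRE-' + str(n).zfill(6):
--             break
--     return 'BRE-' + str(n).zfill(6)
-- ===== Notes on version B (the rewrite author's own statement) =====
-- stated objective: alternative
-- what changed: Instead of counting up and rescanning the whole list for each candidate string, B filters the well-formed 'BRE-' + six-digit strings into a set once, sorts them, and scans positions for the first index whose canonical key is not at that position of the sorted list.
import Mathlib
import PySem

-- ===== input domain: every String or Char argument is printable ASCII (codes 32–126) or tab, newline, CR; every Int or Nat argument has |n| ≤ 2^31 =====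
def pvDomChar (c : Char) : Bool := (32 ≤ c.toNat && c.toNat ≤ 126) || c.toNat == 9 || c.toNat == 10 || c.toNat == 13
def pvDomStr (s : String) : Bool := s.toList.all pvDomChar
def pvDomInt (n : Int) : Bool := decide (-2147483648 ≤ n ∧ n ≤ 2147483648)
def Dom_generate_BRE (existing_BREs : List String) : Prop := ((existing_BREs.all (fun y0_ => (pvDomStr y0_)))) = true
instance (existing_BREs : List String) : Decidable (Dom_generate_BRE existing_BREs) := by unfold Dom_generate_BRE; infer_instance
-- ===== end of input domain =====

-- B replaces A's per-candidate rescan of the whole list by a sort of the distinct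
-- well-formed 'BRE-dddddd' strings followed by a positional gap scan.

-- ===== PORT A =====
-- the 'for n in range(10**num_digits)' loop; bre is the variable BRE carried across iterations
def pvALoop (xs : List String) : List Int → String → String
  | [], bre => bre
  | n :: rest, _ =>
    let bre := "BRE-" ++ PySem.Str.zfill (PySem.Int.toStr n) 6
    if bre ∈ xs then pvALoop xs rest bre else bre

def generate_BRE (existing_BREs : List String) : String :=
  pvALoop existing_BREs (PySem.List.pyRange 0 (10 ^ 6) 1) ""

-- ===== PORT B =====
-- len(s) == 10 and s.startswith('BRE-') and s[4:].isdigit()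
def pvIsBRE (s : String) : Bool :=
  (PySem.Str.len s == 10) && PySem.Str.startswith s "BRE-"
    && PySem.Str.strIsdigit (PySem.Str.slice s (some 4) none)

-- the 'for n in range(10**6): if n >= len(keys) or keys[n] != ...: break' loop;
-- n is the loop variable carried across iterations
def pvBLoop (keys : List String) : List Int → Int → Int
  | [], n => n
  | m :: rest, _ =>
    if PySem.List.len keys ≤ m ∨
        PySem.List.pyGetD keys m "" ≠ "BRE-" ++ PySem.Str.zfill (PySem.Int.toStr m) 6
    then m else pvBLoop keys rest m

def generate_BRE_alt (existing_BREs : List String) : String :=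
  let keys := PySem.List.sorted (PySem.Set.ofList (existing_BREs.filter pvIsBRE)) (fun x => x) false
  let n := pvBLoop keys (PySem.List.pyRange 0 (10 ^ 6) 1) 0
  "BRE-" ++ PySem.Str.zfill (PySem.Int.toStr n) 6

-- ===== PRECONDITION & SPEC =====
def Spec_generate_BRE (existing_BREs : List String) (out : String) : Prop := out = generate_BRE_alt existing_BREs
instance (existing_BREs : List String) (out : String) : Decidable (Spec_generate_BRE existing_BREs out) := by unfold Spec_generate_BRE; infer_instance

-- ===== CLAIM (what is proved, stated in full; the proofs are below) =====
def Claim_equal_generate_BRE : Prop := ∀ (existing_BREs : List String), Dom_generate_BRE existing_BREs → Spec_generate_BRE existing_BREs (generate_BRE existing_BREs)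

-- ===== LEMMAS AND PROOFS =====

lemma pvIsdigit_iff (c : Char) : PySem.Chars.isdigit c = true ↔ 48 ≤ c.toNat ∧ c.toNat ≤ 57 := by
  show ((decide ('0' ≤ c)) && (decide (c ≤ '9'))) = true ↔ _
  simp only [Bool.and_eq_true, decide_eq_true_eq]
  constructor
  · rintro ⟨h1, h2⟩
    exact ⟨UInt32.le_iff_toNat_le.mp h1, UInt32.le_iff_toNat_le.mp h2⟩
  · rintro ⟨h1, h2⟩
    exact ⟨UInt32.le_iff_toNat_le.mpr h1, UInt32.le_iff_toNat_le.mpr h2⟩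

-- the value of a digit string (proof-side only)
def pvVal (cs : List Char) : Int := cs.foldl (fun v ch => 10 * v + ((ch.toNat : Int) - 48)) 0

lemma pvVal_go (ds : List Char) (a : Int) :
    ds.foldl (fun v ch => 10 * v + ((ch.toNat : Int) - 48)) a = a * 10 ^ ds.length + pvVal ds := by
  induction ds generalizing a with
  | nil => simp [pvVal]
  | cons c ds ih =>
    simp only [List.foldl_cons, pvVal, List.length_cons]
    rw [ih, ih (10 * 0 + ((c.toNat : Int) - 48))]
    ring

lemma pvVal_cons (c : Char) (ds : List Char) :
    pvVal (c :: ds) = ((c.toNat : Int) - 48) * 10 ^ ds.length + pvVal ds := by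
  show List.foldl _ _ (c :: ds) = _
  rw [List.foldl_cons, pvVal_go]
  ring_nf

lemma pvVal_bounds (ds : List Char) (h : ∀ c ∈ ds, PySem.Chars.isdigit c = true) :
    0 ≤ pvVal ds ∧ pvVal ds < 10 ^ ds.length := by
  induction ds with
  | nil => simp [pvVal]
  | cons c ds ih =>
    have hc := (pvIsdigit_iff c).mp (h c (by simp))
    have hrest := ih (fun d hd => h d (by simp [hd]))
    have hp : (0:Int) < 10 ^ ds.length := by positivity
    have hv1 : (0:Int) ≤ (c.toNat : Int) - 48 := by omega
    have hv2 : (c.toNat : Int) - 48 ≤ 9 := by omega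
    rw [pvVal_cons]
    constructor
    · nlinarith
    · simp only [List.length_cons, pow_succ]
      nlinarith

lemma pvVal_inj (ds es : List Char) (hd : ∀ c ∈ ds, PySem.Chars.isdigit c = true)
    (he : ∀ c ∈ es, PySem.Chars.isdigit c = true) (hl : ds.length = es.length)
    (hv : pvVal ds = pvVal es) : ds = es := by
  induction ds generalizing es with
  | nil => cases es with
    | nil => rfl
    | cons => simp at hl
  | cons c ds ih =>
    cases es with
    | nil => simp at hl
    | cons e es =>
      have hlen : ds.length = es.length := by simpa using hl
      have hc := (pvIsdigit_iff c).mp (hd c (by simp))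
      have hee := (pvIsdigit_iff e).mp (he e (by simp))
      have hbd := pvVal_bounds ds (fun x hx => hd x (by simp [hx]))
      have hbe := pvVal_bounds es (fun x hx => he x (by simp [hx]))
      rw [pvVal_cons, pvVal_cons, hlen] at hv
      have hp : (0:Int) < 10 ^ es.length := by positivity
      have hvc : ((c.toNat : Int) - 48) = ((e.toNat : Int) - 48) := by
        rcases lt_trichotomy ((c.toNat : Int) - 48) ((e.toNat : Int) - 48) with h | h | h
        · exfalso
          have : ((c.toNat : Int) - 48) + 1 ≤ ((e.toNat : Int) - 48) := by omega
          nlinarith [hbd.1, hbd.2, hbe.1, hbe.2, hlen ▸ hbd.2]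
        · exact h
        · exfalso
          have : ((e.toNat : Int) - 48) + 1 ≤ ((c.toNat : Int) - 48) := by omega
          nlinarith [hbd.1, hbe.1, hbe.2, hlen ▸ hbd.2]
      have hce : c = e := by
        apply Char.ext
        apply UInt32.toNat_inj.mp
        show c.toNat = e.toNat
        omega
      subst hce
      have : pvVal ds = pvVal es := by omega
      rw [ih es (fun x hx => hd x (by simp [hx])) (fun x hx => he x (by simp [hx])) hlen this]

lemma pvVal_replicate_zero (ds : List Char) (k : Nat) :
    pvVal (List.replicate k '0' ++ ds) = pvVal ds := by
  induction k with
  | zero => simp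
  | succ k ih =>
    show pvVal ('0' :: (List.replicate k '0' ++ ds)) = _
    rw [pvVal_cons] at *
    simpa using ih

def pvDigs (n : Nat) : List Char :=
  if n < 10 then [Nat.digitChar n] else pvDigs (n / 10) ++ [Nat.digitChar (n % 10)]
  decreasing_by exact Nat.div_lt_self (by omega) (by omega)

lemma pvToDigitsCore_eq : ∀ (f n : Nat) (acc : List Char), n < f →
    Nat.toDigitsCore 10 f n acc = pvDigs n ++ acc := by
  intro f
  induction f with
  | zero => intro n acc h; omega
  | succ f ih =>
    intro n acc h
    rw [Nat.toDigitsCore]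
    by_cases h10 : n / 10 = 0
    · have hlt : n < 10 := by omega
      simp only [h10]
      rw [pvDigs, if_pos hlt, Nat.mod_eq_of_lt hlt]
      rfl
    · have hge : ¬ n < 10 := by omega
      simp only [h10]
      rw [ih (n / 10) _ (by omega)]
      conv_rhs => rw [pvDigs]
      rw [if_neg hge]
      simp

lemma pvToDigits_eq (n : Nat) : Nat.toDigits 10 n = pvDigs n := by
  have := pvToDigitsCore_eq (n + 1) n [] (by omega)
  simpa [Nat.toDigits] using this

lemma pvDigitChar_digit (k : Nat) (h : k < 10) :
    PySem.Chars.isdigit (Nat.digitChar k) = true ∧ ((Nat.digitChar k).toNat : Int) - 48 = k := by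
  interval_cases k <;> exact ⟨by decide, by decide⟩

lemma pvDigs_digits (n : Nat) : ∀ c ∈ pvDigs n, PySem.Chars.isdigit c = true := by
  induction n using pvDigs.induct with
  | case1 n h =>
    rw [pvDigs, if_pos h]
    intro c hc
    simp at hc
    subst hc
    exact (pvDigitChar_digit n h).1
  | case2 n h ih =>
    rw [pvDigs, if_neg h]
    intro c hc
    rcases List.mem_append.mp hc with hc | hc
    · exact ih c hc
    · simp at hc
      subst hc
      exact (pvDigitChar_digit _ (Nat.mod_lt _ (by omega))).1

lemma pvDigs_val (n : Nat) : pvVal (pvDigs n) = (n : Int) := by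
  induction n using pvDigs.induct with
  | case1 n h =>
    rw [pvDigs, if_pos h]
    have := (pvDigitChar_digit n h).2
    rw [pvVal_cons]
    simp [pvVal]
    omega
  | case2 n h ih =>
    rw [pvDigs, if_neg h]
    show List.foldl _ 0 _ = _
    rw [List.foldl_append]
    show List.foldl _ (pvVal (pvDigs (n/10))) [Nat.digitChar (n % 10)] = _
    simp only [List.foldl_cons, List.foldl_nil, ih]
    have := (pvDigitChar_digit (n % 10) (Nat.mod_lt _ (by omega))).2
    have hn : 10 * (n / 10) + n % 10 = n := by omega
    push_cast
    omega

lemma pvDigs_ne_nil (n : Nat) : pvDigs n ≠ [] := by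
  rw [pvDigs]
  split <;> simp

lemma pvDigs_len_le (n : Nat) (h : n < 10 ^ 6) : (pvDigs n).length ≤ 6 := by
  rw [← pvToDigits_eq]
  exact Nat.toDigits_length 10 n 6 (by omega) h

lemma pvZfill_digits (cs : List Char) (hne : cs ≠ []) (hd : ∀ c ∈ cs, PySem.Chars.isdigit c = true)
    (hl : cs.length ≤ 6) :
    PySem.Chars.zfill cs 6 = List.replicate (6 - cs.length) '0' ++ cs := by
  rw [PySem.Chars.zfill.eq_def]
  by_cases h6 : (6:Int) ≤ (cs.length : Int)
  · have : cs.length = 6 := by omega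
    rw [if_pos h6, this]
    simp
  · rw [if_neg h6]
    cases cs with
    | nil => simp at hne
    | cons c rest =>
      have hc := (pvIsdigit_iff c).mp (hd c (by simp))
      have hcp : ¬ (c = '+' ∨ c = '-') := by
        rintro (rfl | rfl) <;> simp_all
      show (if c = '+' ∨ c = '-' then c :: (List.replicate ((6:Int).toNat - (c :: rest).length) '0' ++ rest)
        else List.replicate ((6:Int).toNat - (c :: rest).length) '0' ++ (c :: rest)) = _
      rw [if_neg hcp]
      simp

-- the canonical key of a number (proof-side only)
def pvKey (n : Int) : String := "BRE-" ++ PySem.Str.zfill (PySem.Int.toStr n) 6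

lemma pvKey_toList (n : Int) (h0 : 0 ≤ n) (h6 : n < 10 ^ 6) :
    (pvKey n).toList = ['B', 'R', 'E', '-'] ++
      (List.replicate (6 - (pvDigs n.toNat).length) '0' ++ pvDigs n.toNat) := by
  have htc : PySem.Int.toChars n = pvDigs n.toNat := by
    rw [PySem.Int.toChars, if_neg (by omega), pvToDigits_eq]
  have hlen : (pvDigs n.toNat).length ≤ 6 := pvDigs_len_le _ (by omega)
  rw [pvKey]
  rw [String.toList_append, PySem.Str.toList_zfill, PySem.Int.toList_toStr, htc,
    pvZfill_digits _ (pvDigs_ne_nil _) (pvDigs_digits _) hlen]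
  rfl

lemma pvSlice4 (s : String) : (PySem.Str.slice s (some 4) none).toList = s.toList.drop 4 := by
  rw [PySem.Str.toList_slice, PySem.Chars.slice_eq_listSlice,
    PySem.List.slice_from s.toList (by omega : (0:Int) ≤ 4)]
  rfl

lemma pvPad_digits (m : Nat) (h : m < 10 ^ 6) :
    (∀ c ∈ List.replicate (6 - (pvDigs m).length) '0' ++ pvDigs m, PySem.Chars.isdigit c = true) ∧
    (List.replicate (6 - (pvDigs m).length) '0' ++ pvDigs m).length = 6 ∧
    pvVal (List.replicate (6 - (pvDigs m).length) '0' ++ pvDigs m) = (m : Int) := by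
  have hL := pvDigs_len_le m h
  refine ⟨?_, ?_, ?_⟩
  · intro c hc
    rcases List.mem_append.mp hc with hc | hc
    · rw [List.eq_of_mem_replicate hc]; decide
    · exact pvDigs_digits m c hc
  · simp; omega
  · rw [pvVal_replicate_zero, pvDigs_val]

lemma pvKey_isBRE (n : Int) (h0 : 0 ≤ n) (h6 : n < 10 ^ 6) :
    pvIsBRE (pvKey n) = true ∧ pvVal (PySem.Str.slice (pvKey n) (some 4) none).toList = n := by
  have hmn : n.toNat < 10 ^ 6 := by omega
  obtain ⟨hdig, hlen, hval⟩ := pvPad_digits n.toNat hmn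
  have hkey := pvKey_toList n h0 h6
  have hdrop : (pvKey n).toList.drop 4 =
      List.replicate (6 - (pvDigs n.toNat).length) '0' ++ pvDigs n.toNat := by
    rw [hkey]; rfl
  have hslice := (pvSlice4 (pvKey n)).trans hdrop
  constructor
  · rw [pvIsBRE]
    simp only [Bool.and_eq_true, beq_iff_eq]
    refine ⟨⟨?_, ?_⟩, ?_⟩
    · rw [PySem.Str.len_eq, hkey]
      simp [hlen]
    · rw [PySem.Str.startswith_eq]
      rw [PySem.Chars.startswith_iff, hkey]
      exact ⟨_, rfl⟩
    · rw [PySem.Str.strIsdigit_eq, PySem.Chars.strIsdigit, hslice]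
      simp only [Bool.and_eq_true, Bool.not_eq_eq_eq_not, List.all_eq_true]
      constructor
      · show _ = false
        rw [List.isEmpty_eq_false_iff]
        intro hnil
        rw [hnil] at hlen
        simp at hlen
      · exact hdig
  · rw [hslice, hval, Int.toNat_of_nonneg h0]

-- the parsed value of a well-formed key (proof-side only)
def pvValOf (s : String) : Int := pvVal (PySem.Str.slice s (some 4) none).toList

lemma pvIsBRE_eq_key (s : String) (h : pvIsBRE s = true) :
    0 ≤ pvValOf s ∧ pvValOf s < 10 ^ 6 ∧ s = pvKey (pvValOf s) := by
  rw [pvIsBRE] at h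
  simp only [Bool.and_eq_true, beq_iff_eq] at h
  obtain ⟨⟨hlen, hpre⟩, hdig⟩ := h
  rw [PySem.Str.len_eq] at hlen
  have hlen10 : s.toList.length = 10 := by omega
  rw [PySem.Str.startswith_eq, PySem.Chars.startswith_iff] at hpre
  obtain ⟨t, ht⟩ := hpre
  have htl : t.length = 6 := by
    have hh := congrArg List.length ht
    rw [List.length_append, hlen10] at hh
    have h4 : ("BRE-".toList).length = 4 := rfl
    omega
  have hdropt : s.toList.drop 4 = t := by rw [← ht]; rfl
  have hslice := (pvSlice4 s).trans hdropt
  rw [PySem.Str.strIsdigit_eq, PySem.Chars.strIsdigit] at hdig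
  simp only [Bool.and_eq_true, List.all_eq_true] at hdig
  have htdig : ∀ c ∈ t, PySem.Chars.isdigit c = true := by
    intro c hc; exact hdig.2 c (by rw [hslice]; exact hc)
  have hb := pvVal_bounds t htdig
  rw [htl] at hb
  have h0 : 0 ≤ pvVal t := hb.1
  have h6 : pvVal t < 10 ^ 6 := by exact_mod_cast hb.2
  obtain ⟨hdigp, hlenp, hvalp⟩ := pvPad_digits (pvVal t).toNat (by omega)
  have hvv : pvVal (List.replicate (6 - (pvDigs (pvVal t).toNat).length) '0' ++ pvDigs (pvVal t).toNat) = pvVal t := by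
    rw [hvalp, Int.toNat_of_nonneg h0]
  have hpad_eq : List.replicate (6 - (pvDigs (pvVal t).toNat).length) '0' ++ pvDigs (pvVal t).toNat = t :=
    pvVal_inj _ _ hdigp htdig (by rw [hlenp, htl]) (by rw [hvv])
  have hkey := pvKey_toList (pvVal t) h0 h6
  have hv : pvValOf s = pvVal t := by rw [pvValOf, hslice]
  rw [hv]
  refine ⟨h0, h6, ?_⟩
  apply String.toList_inj.mp
  rw [hkey, hpad_eq, ← ht]
  rfl

-- lexicographic order on digit lists agrees with the numeric order
lemma pvCharLt_iff (c d : Char) : c < d ↔ c.toNat < d.toNat :=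
  ⟨UInt32.lt_iff_toNat_lt.mp, UInt32.lt_iff_toNat_lt.mpr⟩

lemma pvLex_append (p a b : List Char) (h : a < b) : (p ++ a) < (p ++ b) := by
  induction p with
  | nil => simpa using h
  | cons c p ih =>
    exact List.cons_lt_cons_iff.mpr (Or.inr ⟨rfl, ih⟩)

lemma pvVal_lt_lex : ∀ (a b : List Char), a.length = b.length →
    (∀ c ∈ a, PySem.Chars.isdigit c = true) → (∀ c ∈ b, PySem.Chars.isdigit c = true) →
    pvVal a < pvVal b → a < b := by
  intro a
  induction a with
  | nil =>
    intro b hl _ _ hv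
    cases b with
    | nil => simp [pvVal] at hv
    | cons => simp at hl
  | cons c a ih =>
    intro b hl hda hdb hv
    cases b with
    | nil => simp at hl
    | cons d b =>
      have hlen : a.length = b.length := by simpa using hl
      have hc := (pvIsdigit_iff c).mp (hda c (by simp))
      have hd := (pvIsdigit_iff d).mp (hdb d (by simp))
      have hba := pvVal_bounds a (fun x hx => hda x (by simp [hx]))
      have hbb := pvVal_bounds b (fun x hx => hdb x (by simp [hx]))
      rw [pvVal_cons, pvVal_cons, hlen] at hv
      have hp : (0:Int) < 10 ^ b.length := by positivity
      rcases lt_trichotomy c.toNat d.toNat with hcd | hcd | hcd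
      · exact List.cons_lt_cons_iff.mpr (Or.inl ((pvCharLt_iff c d).mpr hcd))
      · have hce : c = d := by
          apply Char.ext
          apply UInt32.toNat_inj.mp
          show c.toNat = d.toNat
          omega
        subst hce
        have hv' : pvVal a < pvVal b := lt_of_add_lt_add_left hv
        exact List.cons_lt_cons_iff.mpr
          (Or.inr ⟨rfl, ih b hlen (fun x hx => hda x (by simp [hx]))
            (fun x hx => hdb x (by simp [hx])) hv'⟩)
      · exfalso
        have h1 : ((d.toNat : Int) - 48) + 1 ≤ ((c.toNat : Int) - 48) := by omega
        nlinarith [hba.1, hbb.2, hlen ▸ hba.2]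

lemma pvKey_lt (m n : Int) (h0 : 0 ≤ m) (h6 : n < 10 ^ 6) (hmn : m < n) :
    pvKey m < pvKey n := by
  rw [String.lt_iff_toList_lt,
    pvKey_toList m h0 (by omega), pvKey_toList n (by omega) h6]
  apply pvLex_append
  obtain ⟨hd1, hl1, hv1⟩ := pvPad_digits m.toNat (by omega)
  obtain ⟨hd2, hl2, hv2⟩ := pvPad_digits n.toNat (by omega)
  apply pvVal_lt_lex _ _ (by rw [hl1, hl2]) hd1 hd2
  rw [hv1, hv2]
  omega

lemma pvKey_inj (m n : Int) (h0 : 0 ≤ m) (h6 : m < 10 ^ 6) (h0' : 0 ≤ n) (h6' : n < 10 ^ 6)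
    (h : pvKey m = pvKey n) : m = n := by
  have hm := (pvKey_isBRE m h0 h6).2
  have hn := (pvKey_isBRE n h0' h6').2
  rw [h] at hm
  omega

-- the valid keys of the input, sorted by their numeric value (proof-side only)
def pvVals (xs : List String) : List Int :=
  PySem.List.sorted ((PySem.Set.ofList (xs.filter pvIsBRE)).map pvValOf) (fun x => x) false

lemma pvMemS (xs : List String) (s : String) :
    s ∈ PySem.Set.ofList (xs.filter pvIsBRE) ↔ pvIsBRE s = true ∧ s ∈ xs := by
  rw [PySem.Set.mem_ofList, List.mem_filter]
  tauto

lemma pvVals_mem (xs : List String) (v : Int) :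
    v ∈ pvVals xs ↔ ∃ s, (pvIsBRE s = true ∧ s ∈ xs) ∧ pvValOf s = v := by
  rw [pvVals, PySem.List.mem_sorted, List.mem_map]
  constructor
  · rintro ⟨s, hs, hv⟩
    exact ⟨s, (pvMemS xs s).mp hs, hv⟩
  · rintro ⟨s, hs, hv⟩
    exact ⟨s, (pvMemS xs s).mpr hs, hv⟩

lemma pvVals_bounds (xs : List String) (v : Int) (h : v ∈ pvVals xs) :
    0 ≤ v ∧ v < 10 ^ 6 := by
  obtain ⟨s, ⟨hval, _⟩, hv⟩ := (pvVals_mem xs v).mp h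
  obtain ⟨h0, h6, _⟩ := pvIsBRE_eq_key s hval
  omega

lemma pvVals_bridge (xs : List String) (n : Int) (h0 : 0 ≤ n) (h6 : n < 10 ^ 6) :
    n ∈ pvVals xs ↔ pvKey n ∈ xs := by
  rw [pvVals_mem]
  constructor
  · rintro ⟨s, ⟨hval, hmem⟩, hv⟩
    obtain ⟨_, _, hk⟩ := pvIsBRE_eq_key s hval
    rw [hv] at hk
    rw [← hk]
    exact hmem
  · intro h
    exact ⟨pvKey n, ⟨(pvKey_isBRE n h0 h6).1, h⟩, (pvKey_isBRE n h0 h6).2⟩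

lemma pvVals_pairwise (xs : List String) : (pvVals xs).Pairwise (· < ·) := by
  have hnd : (PySem.Set.ofList (xs.filter pvIsBRE)).Nodup := PySem.Set.nodup_ofList _
  have hmapnd : ((PySem.Set.ofList (xs.filter pvIsBRE)).map pvValOf).Nodup := by
    apply List.Nodup.map_on _ hnd
    intro s hs t ht hv
    obtain ⟨hvs, _⟩ := (pvMemS xs s).mp hs
    obtain ⟨hvt, _⟩ := (pvMemS xs t).mp ht
    obtain ⟨_, _, hks⟩ := pvIsBRE_eq_key s hvs
    obtain ⟨_, _, hkt⟩ := pvIsBRE_eq_key t hvt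
    rw [hks, hkt, hv]
  have hperm : (pvVals xs).Perm ((PySem.Set.ofList (xs.filter pvIsBRE)).map pvValOf) :=
    PySem.List.sorted_perm _ _ _
  have hnd' : (pvVals xs).Nodup := hperm.nodup_iff.mpr hmapnd
  have hle : (pvVals xs).Pairwise (fun a b => a ≤ b) := PySem.List.sorted_pairwise _ _
  exact (hle.and hnd').imp (fun h => lt_of_le_of_ne h.1 h.2)

lemma pvKeys_eq (xs : List String) :
    PySem.List.sorted (PySem.Set.ofList (xs.filter pvIsBRE)) (fun x => x) false =
      (pvVals xs).map pvKey := by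
  apply PySem.List.sorted_eq_of_perm_of_pairwise_lt
  · have hperm : (pvVals xs).Perm ((PySem.Set.ofList (xs.filter pvIsBRE)).map pvValOf) :=
      PySem.List.sorted_perm _ _ _
    have h1 : ((pvVals xs).map pvKey).Perm
        (((PySem.Set.ofList (xs.filter pvIsBRE)).map pvValOf).map pvKey) := hperm.map pvKey
    have h2 : ((PySem.Set.ofList (xs.filter pvIsBRE)).map pvValOf).map pvKey =
        PySem.Set.ofList (xs.filter pvIsBRE) := by
      rw [List.map_map]
      conv_rhs => rw [← List.map_id (PySem.Set.ofList (xs.filter pvIsBRE))]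
      apply List.map_congr_left
      intro s hs
      obtain ⟨hval, _⟩ := (pvMemS xs s).mp hs
      show pvKey (pvValOf s) = id s
      exact ((pvIsBRE_eq_key s hval).2.2).symm
    rw [h2] at h1
    exact h1
  · apply List.pairwise_map.mpr
    apply List.Pairwise.imp_of_mem (l := pvVals xs) ?_ (pvVals_pairwise xs)
    intro a b ha hb hab
    exact pvKey_lt a b (pvVals_bounds xs a ha).1 (pvVals_bounds xs b hb).2 hab

lemma pvIdx (vals : List Int) (hp : vals.Pairwise (· < ·))
    (hnn : ∀ v ∈ vals, 0 ≤ v) (a : Int)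
    (hfull : ∀ k, 0 ≤ k → k < a → k ∈ vals) :
    ∀ i : Nat, (i : Int) < a → ∃ hi : i < vals.length, vals[i] = (i : Int) := by
  intro i
  induction i using Nat.strong_induction_on with
  | _ i ih =>
    intro hia
    have hmem : (i : Int) ∈ vals := hfull i (by positivity) hia
    obtain ⟨t, hti, hvt⟩ := List.getElem_of_mem hmem
    have hmono := List.pairwise_iff_getElem.mp hp
    have hit : i ≤ t := by
      by_contra hlt0
      have hlt : t < i := by omega
      obtain ⟨_, hvt'⟩ := ih t hlt (by
        have : (t : Int) < (i : Int) := by exact_mod_cast hlt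
        omega)
      rw [hvt'] at hvt
      have : t = i := by exact_mod_cast hvt
      omega
    have hi : i < vals.length := lt_of_le_of_lt hit hti
    refine ⟨hi, ?_⟩
    rcases Nat.lt_or_ge i t with hlt | hge
    · exfalso
      have hvi : vals[i] < vals[t] := hmono i t hi hti hlt
      rw [hvt] at hvi
      cases i with
      | zero =>
        have := hnn vals[0] (List.getElem_mem _)
        simp at hvi
        omega
      | succ j =>
        obtain ⟨hj, hvj⟩ := ih j (by omega) (by push_cast at hia; omega)
        have hji : vals[j] < vals[j + 1] := hmono j (j + 1) hj hi (by omega)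
        rw [hvj] at hji
        push_cast at hvi hji
        omega
    · have hti' : t = i := by omega
      subst hti'
      exact hvt

-- the two loops, stepped in parallel over the same range
lemma pvLoops_eq (xs : List String) : ∀ (fuel : Nat) (a : Int) (bre : String) (m : Int),
    ((10:Int) ^ 6 - a).toNat = fuel → 0 ≤ a → a < 10 ^ 6 →
    (∀ k, 0 ≤ k → k < a → k ∈ pvVals xs) →
    pvALoop xs (PySem.List.pyRange a (10 ^ 6) 1) bre =
      "BRE-" ++ PySem.Str.zfill (PySem.Int.toStr
        (pvBLoop ((pvVals xs).map pvKey) (PySem.List.pyRange a (10 ^ 6) 1) m)) 6 := by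
  intro fuel
  induction fuel with
  | zero => intro a bre m hf h0 h6 _; omega
  | succ f ih =>
    intro a bre m hf h0 h6 hfull
    set vals := pvVals xs with hvals
    set keys := vals.map pvKey with hkeys
    have hlenk : keys.length = vals.length := by rw [hkeys, List.length_map]
    rw [PySem.List.pyRange_one_cons h6, pvALoop, pvBLoop]
    rw [show ("BRE-" ++ PySem.Str.zfill (PySem.Int.toStr a) 6) = pvKey a from rfl]
    by_cases hmem : a ∈ vals
    · -- position a matches in both loops: both continue
      have hxs : pvKey a ∈ xs := (pvVals_bridge xs a h0 h6).mp hmem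
      obtain ⟨hi, hvi⟩ := pvIdx vals (pvVals_pairwise xs) (fun v hv => (pvVals_bounds xs v hv).1)
        (a + 1) (fun k hk0 hk1 => by
          rcases lt_or_eq_of_le (by omega : k ≤ a) with h | h
          · exact hfull k hk0 h
          · rw [h]; exact hmem) a.toNat (by omega)
      have hcond : ¬ (PySem.List.len keys ≤ a ∨
          PySem.List.pyGetD keys a "" ≠ pvKey a) := by
        simp only [not_or, not_le, not_not]
        constructor
        · rw [PySem.List.len_eq, hlenk]
          omega
        · rw [PySem.List.pyGetD_eq_getElem keys "" h0 (by rw [hlenk]; exact_mod_cast (by omega : a < (vals.length : Int)))]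
          simp only [hkeys, List.getElem_map]
          rw [hvi, Int.toNat_of_nonneg h0]
      rw [if_pos hxs, if_neg hcond]
      by_cases hnext : a + 1 < 10 ^ 6
      · exact ih (a + 1) (pvKey a) a (by omega) (by omega) hnext (fun k hk0 hk1 => by
          rcases lt_or_eq_of_le (by omega : k ≤ a) with h | h
          · exact hfull k hk0 h
          · rw [h]; exact hmem)
      · have hend : (10:Int) ^ 6 ≤ a + 1 := by omega
        rw [show PySem.List.pyRange (a + 1) (10 ^ 6) 1 = [] by
          simp [PySem.List.pyRange]; omega]
        rw [pvALoop, pvBLoop]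
        rfl
    · -- position a is the first gap: both loops break with value a
      have hxs : pvKey a ∉ xs := fun h => hmem ((pvVals_bridge xs a h0 h6).mpr h)
      have hcond : PySem.List.len keys ≤ a ∨ PySem.List.pyGetD keys a "" ≠ pvKey a := by
        by_cases hl : (vals.length : Int) ≤ a
        · left
          rw [PySem.List.len_eq, hlenk]
          exact hl
        · right
          have hl' : a < (vals.length : Int) := by omega
          have hlt : a.toNat < vals.length := by omega
          rw [PySem.List.pyGetD_eq_getElem keys "" h0 (by rw [hlenk]; exact_mod_cast hl')]
          simp only [hkeys, List.getElem_map]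
          intro heq
          have hvmem : vals[a.toNat] ∈ vals := List.getElem_mem hlt
          obtain ⟨hb0, hb6⟩ := pvVals_bounds xs _ hvmem
          have := pvKey_inj _ _ hb0 hb6 h0 h6 heq
          rw [← this] at hmem
          exact hmem hvmem
      rw [if_neg hxs, if_pos hcond]
      rfl

-- ===== VERDICT (by name: the statement is the Claim_ definition above) =====
theorem generate_BRE_spec : Claim_equal_generate_BRE := by
  intro xs _
  show generate_BRE xs = generate_BRE_alt xs
  show pvALoop xs (PySem.List.pyRange 0 (10 ^ 6) 1) "" =
    "BRE-" ++ PySem.Str.zfill (PySem.Int.toStr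
      (pvBLoop (PySem.List.sorted (PySem.Set.ofList (xs.filter pvIsBRE)) (fun x => x) false)
        (PySem.List.pyRange 0 (10 ^ 6) 1) 0)) 6
  rw [pvKeys_eq]
  exact pvLoops_eq xs ((10:Int) ^ 6 - 0).toNat 0 "" 0 rfl (by omega) (by norm_num)
    (fun k hk0 hk1 => by omega)
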